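-- pv_equiv track=rewrite | github.com/matejaaj/code-completion | data/dataset_files/aibg_hackaton.py | count_letters_in_matrix
-- ===== SOURCE A (Python) =====
-- def count_letters_in_matrix(matrix):
--     count_D = 0
--     count_M = 0
--
--     # Iterate through each row in the matrix
--     for row in matrix:
--         # Iterate through each element in the row
--         for element in row:
--             # Count the occurrences of 'D' and 'M' in the element
--             count_D += element.count('D')
--             count_M += element.count('M')
--
--     return [count_D, count_M]
-- ===== SOURCE B (Python) =====
-- def count_letters_in_matrix(matrix):
--     # Build a full character histogram once, then answer by dictionary lookup.
--     freq = {}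
--     for row in matrix:
--         for element in row:
--             for ch in element:
--                 freq[ch] = freq.get(ch, 0) + 1
--     return [freq.get('D', 0), freq.get('M', 0)]
-- ===== Notes on version B (the rewrite author's own statement) =====
-- stated objective: alternative
-- what changed: Instead of accumulating two dedicated counters via str.count per cell, B builds a character-frequency dictionary (histogram) of every character in the matrix in one pass and then answers with two dictionary lookups for 'D' and 'M'.
import Mathlib
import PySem

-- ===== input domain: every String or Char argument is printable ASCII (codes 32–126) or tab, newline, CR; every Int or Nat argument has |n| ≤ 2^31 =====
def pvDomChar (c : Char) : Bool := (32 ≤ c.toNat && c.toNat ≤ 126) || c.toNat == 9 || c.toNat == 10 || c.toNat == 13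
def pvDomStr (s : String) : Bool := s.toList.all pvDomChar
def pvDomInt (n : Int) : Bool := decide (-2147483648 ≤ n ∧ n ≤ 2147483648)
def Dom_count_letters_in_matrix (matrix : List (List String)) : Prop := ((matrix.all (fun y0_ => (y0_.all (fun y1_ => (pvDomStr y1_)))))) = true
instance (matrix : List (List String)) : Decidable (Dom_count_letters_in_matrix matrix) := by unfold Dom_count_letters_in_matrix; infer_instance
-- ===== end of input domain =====

-- B replaces A's two fused ad-hoc counters with a character-frequency dictionary built in one pass, answered by two lookups (alternative data structure, same cost).


-- ===== PORT A =====
-- nested loop over rows and elements, accumulating the two counters together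
def count_letters_in_matrix (matrix : List (List String)) : List Int :=
  let counts : Int × Int :=
    matrix.foldl (fun acc row =>
      row.foldl (fun (acc : Int × Int) element =>
        (acc.1 + (PySem.Str.count element "D" : Int),
         acc.2 + (PySem.Str.count element "M" : Int))) acc) (0, 0)
  [counts.1, counts.2]

-- ===== PORT B =====
-- build a character-frequency dict over all characters, then look up 'D' and 'M'
def count_letters_in_matrix_alt (matrix : List (List String)) : List Int :=
  let freq : PySem.Dict Char Int :=
    matrix.foldl (fun d row =>
      row.foldl (fun d element =>
        element.toList.foldl (fun d ch => d.insert ch (d.getD ch 0 + 1)) d) d)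
      PySem.Dict.empty
  [freq.getD 'D' 0, freq.getD 'M' 0]

-- ===== PRECONDITION & SPEC =====
def Spec_count_letters_in_matrix (matrix : List (List String)) (out : List Int) : Prop := out = count_letters_in_matrix_alt matrix
instance (matrix : List (List String)) (out : List Int) : Decidable (Spec_count_letters_in_matrix matrix out) := by unfold Spec_count_letters_in_matrix; infer_instance

-- ===== CLAIM (what is proved, stated in full; the proofs are below) =====
def Claim_equal_count_letters_in_matrix : Prop := ∀ (matrix : List (List String)), Dom_count_letters_in_matrix matrix → Spec_count_letters_in_matrix matrix (count_letters_in_matrix matrix)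

-- ===== LEMMAS AND PROOFS =====

-- PySem.Chars.count on a single-character needle is List.count
lemma go_single (c : Char) : ∀ (l : List Char) (fuel acc : Nat), l.length ≤ fuel →
    PySem.Chars.count.go [c] fuel l acc = acc + l.count c := by
  intro l
  induction l with
  | nil => intro fuel acc _; cases fuel <;> simp [PySem.Chars.count.go]
  | cons h t ih =>
    intro fuel acc hle
    cases fuel with
    | zero => simp at hle
    | succ f =>
      have ht : t.length ≤ f := by simpa using hle
      rw [PySem.Chars.count.go]
      by_cases hc : c = h
      · subst hc
        simp [List.isPrefixOf, ih f _ ht]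
        omega
      · simp [List.isPrefixOf, hc, ih f _ ht, Ne.symm hc]

lemma count_single (s : List Char) (c : Char) : PySem.Chars.count s [c] = s.count c := by
  simp [PySem.Chars.count, go_single c s s.length 0 le_rfl]

-- the characters of a matrix, flattened
def flatChars (m : List (List String)) : List Char :=
  (m.flatMap (fun row => row.flatMap (fun el => el.toList)))

-- B's innermost histogram loop counts every character
lemma charFold (l : List Char) : ∀ (d : PySem.Dict Char Int) (c : Char),
    (l.foldl (fun d ch => d.insert ch (d.getD ch 0 + 1)) d).getD c 0
      = d.getD c 0 + l.count c := by
  induction l with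
  | nil => intro d c; simp
  | cons h t ih =>
    intro d c
    rw [List.foldl_cons, ih]
    by_cases hc : c = h
    · subst hc
      simp [PySem.Dict.getD_insert_self]
      ring
    · simp [PySem.Dict.getD_insert, hc, Ne.symm hc]

lemma rowFoldB (row : List String) : ∀ (d : PySem.Dict Char Int) (c : Char),
    (row.foldl (fun d element =>
        element.toList.foldl (fun d ch => d.insert ch (d.getD ch 0 + 1)) d) d).getD c 0
      = d.getD c 0 + (row.flatMap (fun el => el.toList)).count c := by
  induction row with
  | nil => intro d c; simp
  | cons e es ih =>
    intro d c
    rw [List.foldl_cons, ih, charFold]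
    simp [List.count_append]
    ring

lemma matrixFoldB (m : List (List String)) : ∀ (d : PySem.Dict Char Int) (c : Char),
    (m.foldl (fun d row =>
        row.foldl (fun d element =>
          element.toList.foldl (fun d ch => d.insert ch (d.getD ch 0 + 1)) d) d) d).getD c 0
      = d.getD c 0 + (flatChars m).count c := by
  induction m with
  | nil => intro d c; simp [flatChars]
  | cons r rs ih =>
    intro d c
    rw [List.foldl_cons, ih, rowFoldB]
    simp [flatChars, List.count_append]
    ring

-- A's fused double loop accumulates the same two character counts
lemma rowFoldA (c₁ c₂ : Char) (row : List String) : ∀ (a b : Int),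
    row.foldl (fun (acc : Int × Int) element =>
        (acc.1 + (PySem.Chars.count element.toList [c₁] : Int),
         acc.2 + (PySem.Chars.count element.toList [c₂] : Int))) (a, b)
      = (a + ((row.flatMap (fun el => el.toList)).count c₁ : Int),
         b + ((row.flatMap (fun el => el.toList)).count c₂ : Int)) := by
  induction row with
  | nil => intro a b; simp
  | cons e es ih =>
    intro a b
    rw [List.foldl_cons, ih]
    simp only [List.flatMap_cons, List.count_append, count_single, Prod.mk.injEq]
    refine ⟨?_, ?_⟩ <;> push_cast <;> ring

lemma matrixFoldA (c₁ c₂ : Char) (m : List (List String)) : ∀ (a b : Int),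
    m.foldl (fun acc row =>
      row.foldl (fun (acc : Int × Int) element =>
        (acc.1 + (PySem.Chars.count element.toList [c₁] : Int),
         acc.2 + (PySem.Chars.count element.toList [c₂] : Int))) acc) (a, b)
      = (a + ((flatChars m).count c₁ : Int), b + ((flatChars m).count c₂ : Int)) := by
  induction m with
  | nil => intro a b; simp [flatChars]
  | cons r rs ih =>
    intro a b
    rw [List.foldl_cons, rowFoldA, ih]
    simp only [flatChars, List.flatMap_cons, List.count_append, Prod.mk.injEq]
    refine ⟨?_, ?_⟩ <;> push_cast <;> ring

-- ===== VERDICT (by name: the statement is the Claim_ definition above) =====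
theorem count_letters_in_matrix_spec : Claim_equal_count_letters_in_matrix := by
  intro matrix _
  unfold Spec_count_letters_in_matrix count_letters_in_matrix count_letters_in_matrix_alt
  have hD : ("D" : String).toList = ['D'] := rfl
  have hM : ("M" : String).toList = ['M'] := rfl
  simp only [PySem.Str.count_eq, hD, hM]
  rw [matrixFoldA 'D' 'M' matrix 0 0]
  rw [matrixFoldB matrix PySem.Dict.empty 'D', matrixFoldB matrix PySem.Dict.empty 'M']
  simp
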